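-- pv_equiv track=rewrite | github.com/MikeD89/AdventOfPython | 2022/2022_day_24.py | blizzard_states
-- ===== SOURCE A (Python) =====
-- import math
--
-- def blizzard_states(blizzards, width, height):
--     lcm = math.lcm(width, height)
--     states = []
--
--     for i in range(lcm):
--         state = []
--         for i, blizzard in enumerate(blizzards):
--             # store it
--             state.append((blizzard[0], blizzard[1]))
--
--             # update it
--             x = blizzard[0] + blizzard[2][0]
--             y = blizzard[1] + blizzard[2][1]
--             if x < 0:
--                 x = width - 1
--             elif x >= width:
--                 x = 0
--             if y < 0:
--                 y = height - 1
--             elif y >= height: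
--                 y = 0
--             blizzards[i] = (x, y, blizzard[2])
--         states.append(state)
--     return states
-- ===== SOURCE B (Python) =====
-- import math
--
-- def blizzard_states(blizzards, width, height):
--     # Blizzard-major: compute each blizzard's full trajectory over the lcm period
--     # (same one-step clamp as the grid rules), then transpose into per-time states.
--     # Does not mutate the input list.
--     n = math.lcm(width, height)
--
--     def traj(x, y, dx, dy):
--         positions = []
--         for _ in range(n):
--             positions.append((x, y))
--             x += dx
--             y += dy
--             if x < 0:
--                 x = width - 1
--             elif x >= width:
--                 x = 0
--             if y < 0:
--                 y = height - 1
--             elif y >= height: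
--                 y = 0
--         return positions
--
--     trajs = [traj(x, y, v[0], v[1]) for (x, y, v) in blizzards]
--     return [[t[i] for t in trajs] for i in range(n)]
-- ===== Notes on version B (the rewrite author's own statement) =====
-- stated objective: alternative
-- what changed: B iterates blizzard-major (each blizzard's whole lcm-length trajectory is computed independently with the same one-step clamp, then the per-time states are obtained by transposing) instead of A's time-outer/blizzard-inner stepping that mutates the blizzard list each tick; B does not mutate its input.
import Mathlib
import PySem

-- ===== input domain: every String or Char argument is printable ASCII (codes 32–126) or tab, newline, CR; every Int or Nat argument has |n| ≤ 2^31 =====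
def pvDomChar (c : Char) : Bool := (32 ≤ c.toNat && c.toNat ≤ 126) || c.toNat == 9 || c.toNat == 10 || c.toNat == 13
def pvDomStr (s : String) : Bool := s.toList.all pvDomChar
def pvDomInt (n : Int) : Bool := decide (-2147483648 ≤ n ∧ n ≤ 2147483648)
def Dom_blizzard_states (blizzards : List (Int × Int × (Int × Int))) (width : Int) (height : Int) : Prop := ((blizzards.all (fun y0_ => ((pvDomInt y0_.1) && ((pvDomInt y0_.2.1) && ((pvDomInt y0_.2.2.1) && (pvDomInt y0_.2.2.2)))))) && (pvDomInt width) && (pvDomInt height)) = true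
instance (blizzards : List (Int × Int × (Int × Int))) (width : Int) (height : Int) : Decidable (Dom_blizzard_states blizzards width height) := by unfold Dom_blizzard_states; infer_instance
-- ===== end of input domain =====

-- B replaces A's time-outer/blizzard-inner mutating simulation by independent per-blizzard
-- trajectories transposed into per-time states (objective: alternative decomposition, same cost).
-- Python A mutates its `blizzards` argument in place (and does not in general restore it) while
-- B does not; the equivalence proved here is about the RETURN value only.

-- ===== PORT A =====
-- One enumerate-inner-loop body: record the position, step-and-clamp, write back at index i.
def pvInnerA (width height : Int) (bs : List (Int × Int × (Int × Int))) :
    (List (Int × Int)) × (List (Int × Int × (Int × Int))) :=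
  (PySem.List.enumerate bs 0).foldl (fun acc p =>
    let blizzard := p.2
    let x0 := blizzard.1 + blizzard.2.2.1
    let y0 := blizzard.2.1 + blizzard.2.2.2
    let x := if x0 < 0 then width - 1 else if x0 >= width then 0 else x0
    let y := if y0 < 0 then height - 1 else if y0 >= height then 0 else y0
    (acc.1 ++ [(blizzard.1, blizzard.2.1)], acc.2.set p.1.toNat (x, y, blizzard.2.2)))
    ([], bs)

def blizzard_states (blizzards : List (Int × Int × (Int × Int))) (width : Int) (height : Int) : List (List (Int × Int)) :=
  let lcm := Int.lcm width height   -- math.lcm is nonnegative, so range(lcm) = List.range lcm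
  ((List.range lcm).foldl (fun acc _ =>
    let r := pvInnerA width height acc.2
    (acc.1 ++ [r.1], r.2)) (([] : List (List (Int × Int))), blizzards)).1

-- ===== PORT B =====
-- one step of Source B's traj loop: move then clamp
def pvStepB (width height x y dx dy : Int) : Int × Int :=
  let x1 := x + dx
  let y1 := y + dy
  let x2 := if x1 < 0 then width - 1 else if x1 >= width then 0 else x1
  let y2 := if y1 < 0 then height - 1 else if y1 >= height then 0 else y1
  (x2, y2)

-- Source B's traj: append current position, step, repeat n times
def pvTraj (width height : Int) : Nat → Int → Int → Int → Int → List (Int × Int)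
  | 0, _, _, _, _ => []
  | n + 1, x, y, dx, dy =>
    (x, y) :: pvTraj width height n (pvStepB width height x y dx dy).1 (pvStepB width height x y dx dy).2 dx dy

def blizzard_states_alt (blizzards : List (Int × Int × (Int × Int))) (width : Int) (height : Int) : List (List (Int × Int)) :=
  let n := Int.lcm width height
  let trajs := blizzards.map (fun b => pvTraj width height n b.1 b.2.1 b.2.2.1 b.2.2.2)
  (List.range n).map (fun i => trajs.map (fun t => t.getD i (0, 0)))

-- ===== PRECONDITION & SPEC =====
def Spec_blizzard_states (blizzards : List (Int × Int × (Int × Int))) (width : Int) (height : Int) (out : List (List (Int × Int))) : Prop := out = blizzard_states_alt blizzards width height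
instance (blizzards : List (Int × Int × (Int × Int))) (width : Int) (height : Int) (out : List (List (Int × Int))) : Decidable (Spec_blizzard_states blizzards width height out) := by unfold Spec_blizzard_states; infer_instance

-- ===== CLAIM (what is proved, stated in full; the proofs are below) =====
def Claim_equal_blizzard_states : Prop := ∀ (blizzards : List (Int × Int × (Int × Int))) (width : Int) (height : Int), Dom_blizzard_states blizzards width height → Spec_blizzard_states blizzards width height (blizzard_states blizzards width height)

-- ===== LEMMAS AND PROOFS =====

-- proof-only abbreviations: one blizzard's recorded position and one clamp-step
def pvPos (b : Int × Int × (Int × Int)) : Int × Int := (b.1, b.2.1)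

def pvStepOne (w h : Int) (b : Int × Int × (Int × Int)) : Int × Int × (Int × Int) :=
  ((pvStepB w h b.1 b.2.1 b.2.2.1 b.2.2.2).1, (pvStepB w h b.1 b.2.1 b.2.2.1 b.2.2.2).2, b.2.2)

def pvStepAll (w h : Int) (bs : List (Int × Int × (Int × Int))) : List (Int × Int × (Int × Int)) :=
  bs.map (pvStepOne w h)

lemma pvSet_append (v : α) : ∀ (pre : List α) (b : α) (rest : List α),
    (pre ++ b :: rest).set pre.length v = pre ++ v :: rest := by
  intro pre
  induction pre with
  | nil => intro b rest; rfl
  | cons p pre ih => intro b rest; simp [ih]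

-- A's inner enumerate loop, generalized: `pre` holds already-updated blizzards
lemma pvInnerA_aux (w h : Int) : ∀ (rest pre : List (Int × Int × (Int × Int)))
    (acc : List (Int × Int)),
    List.foldl (fun acc p =>
      let blizzard := p.2
      let x0 := blizzard.1 + blizzard.2.2.1
      let y0 := blizzard.2.1 + blizzard.2.2.2
      let x := if x0 < 0 then w - 1 else if x0 >= w then 0 else x0
      let y := if y0 < 0 then h - 1 else if y0 >= h then 0 else y0
      (acc.1 ++ [(blizzard.1, blizzard.2.1)], acc.2.set p.1.toNat (x, y, blizzard.2.2)))
      (acc, pre ++ rest) (PySem.List.enumerate rest (pre.length : Int))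
    = (acc ++ rest.map pvPos, pre ++ rest.map (pvStepOne w h)) := by
  intro rest
  induction rest with
  | nil => intro pre acc; simp [PySem.List.enumerate_nil]
  | cons b rest ih =>
    intro pre acc
    rw [PySem.List.enumerate_cons]
    simp only [List.foldl_cons, Int.toNat_natCast]
    rw [pvSet_append]
    have h3 := ih (pre ++ [pvStepOne w h b]) (acc ++ [pvPos b])
    simp only [List.length_append, List.length_cons, List.length_nil, Nat.cast_add,
      Nat.cast_one, zero_add, List.append_assoc, List.cons_append,
      List.nil_append] at h3
    simp only [pvStepOne, pvStepB, pvPos] at h3 ⊢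
    rw [h3]
    simp [pvStepOne, pvStepB, pvPos]

lemma pvInnerA_eq (w h : Int) (bs : List (Int × Int × (Int × Int))) :
    pvInnerA w h bs = (bs.map pvPos, bs.map (pvStepOne w h)) := by
  have := pvInnerA_aux w h bs [] []
  simpa [pvInnerA] using this

-- A's outer loop over `range n`, generalized over the accumulator
lemma pvOuterA (w h : Int) (n : Nat) (bs : List (Int × Int × (Int × Int))) :
    List.foldl (fun acc _ =>
      let r := pvInnerA w h acc.2
      (acc.1 ++ [r.1], r.2)) (([] : List (List (Int × Int))), bs) (List.range n)
    = ((List.range n).map (fun t => ((pvStepAll w h)^[t] bs).map pvPos),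
       (pvStepAll w h)^[n] bs) := by
  induction n with
  | zero => simp
  | succ n ih =>
    rw [List.range_succ, List.foldl_append, ih, List.map_append]
    simp [pvInnerA_eq, Function.iterate_succ_apply', pvStepAll]

-- iterating the all-blizzards step = mapping the iterated one-blizzard step
lemma pvIterMap (w h : Int) : ∀ (t : Nat) (bs : List (Int × Int × (Int × Int))),
    (pvStepAll w h)^[t] bs = bs.map ((pvStepOne w h)^[t]) := by
  intro t
  induction t with
  | zero => intro bs; simp
  | succ t ih =>
    intro bs
    rw [Function.iterate_succ_apply, ih]
    simp only [pvStepAll, List.map_map]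
    apply List.map_congr_left
    intro b _
    simp [Function.iterate_succ_apply]

-- B's trajectory list is the orbit of the one-blizzard step
lemma pvTraj_eq (w h : Int) : ∀ (n : Nat) (x y dx dy : Int),
    pvTraj w h n x y dx dy
    = (List.range n).map (fun t => pvPos ((pvStepOne w h)^[t] (x, y, (dx, dy)))) := by
  intro n
  induction n with
  | zero => intro x y dx dy; simp [pvTraj]
  | succ n ih =>
    intro x y dx dy
    rw [List.range_succ_eq_map, pvTraj, ih]
    simp only [List.map_cons, List.map_map, Function.iterate_zero_apply, pvPos]
    congr 1

-- ===== VERDICT (by name: the statement is the Claim_ definition above) =====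
theorem blizzard_states_spec : Claim_equal_blizzard_states := by
  intro bs w h _
  unfold Spec_blizzard_states blizzard_states blizzard_states_alt
  simp only [pvOuterA, pvIterMap, pvTraj_eq, List.map_map]
  apply List.map_congr_left
  intro t ht
  apply List.map_congr_left
  intro b _
  simp [List.getD, List.mem_range.mp ht]
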